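-- pv_equiv track=rewrite | github.com/ronit450/Habib-University-Semester2-DSA-Programs | Assignment1/Recognizing pattern using stacks.py | l3
-- ===== SOURCE A (Python) =====
-- def is_empty(lst):
--     if len(lst) == 0:
--         return True
--     else:
--         return False
--
-- def push(lst, item):
--     lst.append(item)
--
-- def pop(lst):
--     if is_empty(lst) == False:
--         lst.pop()
--     else:
--         return False
--
-- def l3(inputstring):
--     stack= []
--     temp  =0
--     if '1' not in inputstring or '0' not in inputstring or '2' not in inputstring or '3' not in inputstring :
--         return False
--     for i in inputstring:
--         if i == '0' :
--             push(stack, i)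
--         elif i == '1'  :
--             if is_empty(stack) == False:
--                 pop(stack)
--             else:
--                 return False
--     if is_empty(stack) == True:
--         temp =+ 1
--     else:
--         temp = 0
--     while is_empty(stack) == False :
--         pop(stack)
--     for i in inputstring:
--         if i == '2':
--             push(stack,i)
--         elif i == '3':
--             if is_empty(stack) == False:
--                 pop(stack)
--             else:
--                 return False
--     if is_empty(stack) == True:
--         temp = temp+1
--     else:
--         temp = 0
--     if temp == 2 :
--         return True
--     else:
--         return False
-- ===== SOURCE B (Python) =====
-- def l3(inputstring):
--     if any(c not in inputstring for c in '0123'):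
--         return False
--     bal01 = 0
--     bal23 = 0
--     for ch in inputstring:
--         if ch == '0':
--             bal01 += 1
--         elif ch == '1':
--             bal01 -= 1
--             if bal01 < 0:
--                 return False
--         elif ch == '2':
--             bal23 += 1
--         elif ch == '3':
--             bal23 -= 1
--             if bal23 < 0:
--                 return False
--     return bal01 == 0 and bal23 == 0
-- ===== Notes on version B (the rewrite author's own statement) =====
-- stated objective: simpler
-- what changed: Replaces the two separate stack passes (plus a stack-emptying while loop and a temp flag) with one single pass over the string maintaining two integer balance counters.
import Mathlib
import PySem

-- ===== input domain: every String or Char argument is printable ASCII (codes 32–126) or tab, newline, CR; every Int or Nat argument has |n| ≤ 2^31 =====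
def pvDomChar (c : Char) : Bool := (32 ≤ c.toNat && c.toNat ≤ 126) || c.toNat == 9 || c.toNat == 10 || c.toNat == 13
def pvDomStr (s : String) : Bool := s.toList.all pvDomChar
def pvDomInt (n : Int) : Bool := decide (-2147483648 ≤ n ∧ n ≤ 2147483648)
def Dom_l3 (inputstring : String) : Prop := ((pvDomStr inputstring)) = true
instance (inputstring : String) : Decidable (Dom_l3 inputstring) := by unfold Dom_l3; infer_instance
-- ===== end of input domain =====

-- B replaces A's two stack passes (plus stack-emptying while loop and temp flag) by one
-- single pass with two integer balance counters; objective: simpler, same O(n) cost.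

-- ===== PORT A =====
-- helper is_empty(lst)
def l3IsEmpty (lst : List Char) : Bool := if lst.length = 0 then true else false

-- first for-loop: push '0', on '1' pop (remove last) or early-return False (none)
def l3Loop1 : List Char → List Char → Option (List Char)
  | [], stack => some stack
  | i :: rest, stack =>
    if i = '0' then l3Loop1 rest (stack ++ [i])        -- push(stack, i)
    else if i = '1' then
      if l3IsEmpty stack = false then l3Loop1 rest stack.dropLast   -- pop(stack)
      else none                                        -- return False
    else l3Loop1 rest stack

-- 'while is_empty(stack) == False: pop(stack)'
def l3PopAll (stack : List Char) : List Char :=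
  if l3IsEmpty stack = false then l3PopAll stack.dropLast else stack
termination_by stack.length
decreasing_by
  rcases stack with _ | ⟨a, t⟩
  · simp [l3IsEmpty] at *
  · simp only [List.length_dropLast, List.length_cons]; omega

-- second for-loop: push '2', on '3' pop or early-return False (none)
def l3Loop2 : List Char → List Char → Option (List Char)
  | [], stack => some stack
  | i :: rest, stack =>
    if i = '2' then l3Loop2 rest (stack ++ [i])
    else if i = '3' then
      if l3IsEmpty stack = false then l3Loop2 rest stack.dropLast
      else none
    else l3Loop2 rest stack

def l3 (inputstring : String) : Bool :=
  let cs := inputstring.toList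
  if ¬ cs.contains '1' ∨ ¬ cs.contains '0' ∨ ¬ cs.contains '2' ∨ ¬ cs.contains '3' then
    false
  else
    match l3Loop1 cs [] with
    | none => false
    | some stack1 =>
      -- 'temp =+ 1' in the source is 'temp = +1', i.e. temp = 1
      let temp1 : Int := if l3IsEmpty stack1 = true then 1 else 0
      let stack2 := l3PopAll stack1
      match l3Loop2 cs stack2 with
      | none => false
      | some stack3 =>
        let temp2 : Int := if l3IsEmpty stack3 = true then temp1 + 1 else 0
        if temp2 = 2 then true else false

-- ===== PORT B =====
-- single pass with two integer balances
def l3AltGo : List Char → Int → Int → Bool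
  | [], bal01, bal23 => bal01 == 0 && bal23 == 0
  | ch :: rest, bal01, bal23 =>
    if ch = '0' then l3AltGo rest (bal01 + 1) bal23
    else if ch = '1' then
      if bal01 - 1 < 0 then false else l3AltGo rest (bal01 - 1) bal23
    else if ch = '2' then l3AltGo rest bal01 (bal23 + 1)
    else if ch = '3' then
      if bal23 - 1 < 0 then false else l3AltGo rest bal01 (bal23 - 1)
    else l3AltGo rest bal01 bal23

def l3_alt (inputstring : String) : Bool :=
  let cs := inputstring.toList
  if ['0', '1', '2', '3'].any (fun c => ¬ cs.contains c) then false
  else l3AltGo cs 0 0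

-- ===== PRECONDITION & SPEC =====
def Spec_l3 (inputstring : String) (out : Bool) : Prop := out = l3_alt inputstring
instance (inputstring : String) (out : Bool) : Decidable (Spec_l3 inputstring out) := by unfold Spec_l3; infer_instance

-- ===== CLAIM (what is proved, stated in full; the proofs are below) =====
def Claim_equal_l3 : Prop := ∀ (inputstring : String), Dom_l3 inputstring → Spec_l3 inputstring (l3 inputstring)

-- ===== LEMMAS AND PROOFS =====

-- proof-only helpers: each pass with the stack replaced by its length (a Nat counter)
def natRun01 : List Char → Nat → Option Nat
  | [], n => some n
  | c :: rest, n =>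
    if c = '0' then natRun01 rest (n + 1)
    else if c = '1' then if n = 0 then none else natRun01 rest (n - 1)
    else natRun01 rest n

def natRun23 : List Char → Nat → Option Nat
  | [], n => some n
  | c :: rest, n =>
    if c = '2' then natRun23 rest (n + 1)
    else if c = '3' then if n = 0 then none else natRun23 rest (n - 1)
    else natRun23 rest n

-- single-counter Int versions of B's two balances
def run01 : List Char → Int → Bool
  | [], b => b == 0
  | c :: rest, b =>
    if c = '0' then run01 rest (b + 1)
    else if c = '1' then if b - 1 < 0 then false else run01 rest (b - 1)
    else run01 rest b

def run23 : List Char → Int → Bool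
  | [], b => b == 0
  | c :: rest, b =>
    if c = '2' then run23 rest (b + 1)
    else if c = '3' then if b - 1 < 0 then false else run23 rest (b - 1)
    else run23 rest b

-- B's single pass is the conjunction of the two single-counter passes
theorem go_eq_run (cs : List Char) : ∀ b01 b23 : Int,
    l3AltGo cs b01 b23 = (run01 cs b01 && run23 cs b23) := by
  induction cs with
  | nil => intro b01 b23; simp [l3AltGo, run01, run23]
  | cons c rest ih =>
    intro b01 b23
    by_cases h0 : c = '0'
    · simp [l3AltGo, run01, run23, h0, ih]
    · by_cases h1 : c = '1'
      · by_cases hu : b01 - 1 < 0 <;>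
          simp [l3AltGo, run01, run23, h0, h1, hu, ih]
      · by_cases h2 : c = '2'
        · simp [l3AltGo, run01, run23, h0, h1, h2, ih]
        · by_cases h3 : c = '3'
          · by_cases hu : b23 - 1 < 0 <;>
              simp [l3AltGo, run01, run23, h0, h1, h2, h3, hu, ih]
          · simp [l3AltGo, run01, run23, h0, h1, h2, h3, ih]

-- A's stacks only matter through their lengths
theorem loop1_len (cs : List Char) : ∀ stack : List Char,
    (l3Loop1 cs stack).map List.length = natRun01 cs stack.length := by
  induction cs with
  | nil => intro stack; simp [l3Loop1, natRun01]
  | cons c rest ih =>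
    intro stack
    by_cases h0 : c = '0'
    · subst h0; simp [l3Loop1, natRun01, ih]
    · by_cases h1 : c = '1'
      · subst h1
        rcases stack with _ | ⟨a, t⟩
        · simp [l3Loop1, natRun01, l3IsEmpty, h0]
        · simp [l3Loop1, natRun01, l3IsEmpty, h0, ih, List.length_dropLast]
      · simp [l3Loop1, natRun01, h0, h1, ih]

theorem loop2_len (cs : List Char) : ∀ stack : List Char,
    (l3Loop2 cs stack).map List.length = natRun23 cs stack.length := by
  induction cs with
  | nil => intro stack; simp [l3Loop2, natRun23]
  | cons c rest ih =>
    intro stack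
    by_cases h2 : c = '2'
    · subst h2; simp [l3Loop2, natRun23, ih]
    · by_cases h3 : c = '3'
      · subst h3
        rcases stack with _ | ⟨a, t⟩
        · simp [l3Loop2, natRun23, l3IsEmpty, h2]
        · simp [l3Loop2, natRun23, l3IsEmpty, h2, ih, List.length_dropLast]
      · simp [l3Loop2, natRun23, h2, h3, ih]

-- B's Int balance never goes negative, so it tracks the Nat counter
theorem run01_nat (cs : List Char) : ∀ n : Nat,
    run01 cs (n : Int) = (match natRun01 cs n with
      | none => false
      | some m => decide (m = 0)) := by
  induction cs with
  | nil =>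
    intro n
    rcases n with _ | k
    · simp [run01, natRun01]
    · simp [run01, natRun01]
      omega
  | cons c rest ih =>
    intro n
    by_cases h0 : c = '0'
    · subst h0
      have h' := ih (n + 1)
      push_cast at h'
      simp [run01, natRun01, h']
    · by_cases h1 : c = '1'
      · subst h1
        rcases n with _ | k
        · have hz : ((0 : Nat) : Int) - 1 < 0 := by norm_num
          simp [run01, natRun01, hz, h0]
        · have hc : ¬((k : Int) + 1 - 1 < 0) := by omega
          have he : ((k : Int) + 1 - 1) = (k : Int) := by ring
          simp [run01, natRun01, h0, hc, he, ih]
      · simp [run01, natRun01, h0, h1, ih]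

theorem run23_nat (cs : List Char) : ∀ n : Nat,
    run23 cs (n : Int) = (match natRun23 cs n with
      | none => false
      | some m => decide (m = 0)) := by
  induction cs with
  | nil =>
    intro n
    rcases n with _ | k
    · simp [run23, natRun23]
    · simp [run23, natRun23]
      omega
  | cons c rest ih =>
    intro n
    by_cases h0 : c = '2'
    · subst h0
      have h' := ih (n + 1)
      push_cast at h'
      simp [run23, natRun23, h']
    · by_cases h1 : c = '3'
      · subst h1
        rcases n with _ | k
        · have hz : ((0 : Nat) : Int) - 1 < 0 := by norm_num
          simp [run23, natRun23, hz, h0]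
        · have hc : ¬((k : Int) + 1 - 1 < 0) := by omega
          have he : ((k : Int) + 1 - 1) = (k : Int) := by ring
          simp [run23, natRun23, h0, hc, he, ih]
      · simp [run23, natRun23, h0, h1, ih]

theorem popAll_bounded : ∀ (n : Nat) (stack : List Char), stack.length ≤ n → l3PopAll stack = [] := by
  intro n
  induction n with
  | zero =>
    intro stack hle
    have : stack = [] := by
      cases stack with
      | nil => rfl
      | cons a t => simp at hle
    subst this
    rw [l3PopAll]
    simp [l3IsEmpty]
  | succ k ih =>
    intro stack hle
    rw [l3PopAll]
    cases stack with
    | nil => simp [l3IsEmpty]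
    | cons a t =>
      rw [if_pos (by simp [l3IsEmpty])]
      exact ih _ (by simp [List.length_dropLast] at *; omega)

theorem popAll_eq_nil (stack : List Char) : l3PopAll stack = [] :=
  popAll_bounded stack.length stack le_rfl

theorem l3_eq_runs (s : String)
    (h : ¬ (¬ s.toList.contains '1' ∨ ¬ s.toList.contains '0' ∨
            ¬ s.toList.contains '2' ∨ ¬ s.toList.contains '3')) :
    l3 s = (run01 s.toList 0 && run23 s.toList 0) := by
  have a1 := loop1_len s.toList []
  have a2 := loop2_len s.toList []
  have b1 := run01_nat s.toList 0
  have b2 := run23_nat s.toList 0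
  simp only [List.length_nil, Nat.cast_zero] at a1 a2 b1 b2
  unfold l3
  rw [if_neg h]
  cases e1 : l3Loop1 s.toList [] with
  | none =>
    rw [e1] at a1
    simp only [Option.map_none] at a1
    rw [b1, ← a1]
    simp
  | some st1 =>
    rw [e1] at a1
    simp only [Option.map_some] at a1
    dsimp only
    rw [popAll_eq_nil st1]
    cases e2 : l3Loop2 s.toList [] with
    | none =>
      rw [e2] at a2
      simp only [Option.map_none] at a2
      rw [b2, ← a2]
      simp
    | some st3 =>
      rw [e2] at a2
      simp only [Option.map_some] at a2
      dsimp only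
      rw [b1, b2, ← a1, ← a2]
      simp only [l3IsEmpty]
      by_cases hs1 : st1.length = 0 <;> by_cases hs3 : st3.length = 0 <;>
        simp [hs1, hs3]

-- ===== VERDICT (by name: the statement is the Claim_ definition above) =====
theorem l3_spec : Claim_equal_l3 := by
  intro s _
  unfold Spec_l3 l3_alt
  by_cases h : ['0', '1', '2', '3'].any (fun c => ¬ s.toList.contains c)
  · -- some required character missing: both sides are false
    simp only [h, if_pos]
    unfold l3
    rw [if_pos]
    simp only [List.any_cons, List.any_nil, decide_not] at h
    rcases Bool.or_eq_true_iff.mp h with h' | h'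
    · exact Or.inr (Or.inl (by simpa using h'))
    · rcases Bool.or_eq_true_iff.mp h' with h'' | h''
      · exact Or.inl (by simpa using h'')
      · rcases Bool.or_eq_true_iff.mp h'' with h3 | h3
        · exact Or.inr (Or.inr (Or.inl (by simpa using h3)))
        · exact Or.inr (Or.inr (Or.inr (by simpa using h3)))
  · simp only [h, Bool.false_eq_true, not_false_iff, if_false]
    rw [go_eq_run]
    apply l3_eq_runs
    simp only [List.any_cons, List.any_nil, decide_not, Bool.or_eq_true, Bool.not_eq_true',
      decide_eq_false_iff_not, not_or, not_not] at h
    push_neg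
    exact ⟨by simpa using h.2.1, by simpa using h.1, by simpa using h.2.2.1, by simpa using h.2.2.2.1⟩
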